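-- pv_equiv track=rewrite | github.com/Steve-s2024/Competitive-Programming-root-folder | LeetCode root folder 7/Cyclically Rotating a Grid.py | helper
-- ===== SOURCE A (Python) =====
-- def helper(grid, t, l, b, r):
--     i, j = t, l
--     res = []
--     drct = (0, 1)
--     f = 1
--     while 1:
--         if (i, j) == (t, l):
--             if f:
--                 f = 0
--             else:
--                 break
--             drct = (0, 1)
--         if (i, j) == (t, r): drct = (1, 0)
--         if (i, j) == (b, r): drct = (0, -1)
--         if (i, j) == (b, l): drct = (-1, 0)
--         res.append(grid[i][j])
--         i, j = i + drct[0], j + drct[1]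
--     return res
-- ===== SOURCE B (Python) =====
-- def helper(grid, t, l, b, r):
--     out = []
--     i, j = t, l
--     for (ci, cj), (di, dj) in (((t, r), (0, 1)), ((b, r), (1, 0)), ((b, l), (0, -1)), ((t, l), (-1, 0))):
--         while (i, j) != (ci, cj):
--             out.append(grid[i][j])
--             i += di
--             j += dj
--     return out
-- ===== Notes on version B (the rewrite author's own statement) =====
-- stated objective: simpler
-- what changed: Replaced A's turning state machine (one loop testing all four corners at every cell, mutating a direction variable and a first-visit flag, breaking on return to start) by four predetermined corner-to-corner edge walks: for each of the four (corner, direction) pairs, walk straight until that corner; no direction-switch logic, no flag, no self-intersection test.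
-- crash fix: On every input with t == b A raises IndexError (its last-wins corner test (b,l) immediately turns the walk upward, i decreases forever and grid[i] eventually runs past -len(grid)), while B returns the natural degenerate ring: the single row left-to-right then back, or [] for a single cell. — e.g. on helper([[1, 2]], 0, 0, 0, 1): A raises IndexError, B returns [1, 2]
import Mathlib
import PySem

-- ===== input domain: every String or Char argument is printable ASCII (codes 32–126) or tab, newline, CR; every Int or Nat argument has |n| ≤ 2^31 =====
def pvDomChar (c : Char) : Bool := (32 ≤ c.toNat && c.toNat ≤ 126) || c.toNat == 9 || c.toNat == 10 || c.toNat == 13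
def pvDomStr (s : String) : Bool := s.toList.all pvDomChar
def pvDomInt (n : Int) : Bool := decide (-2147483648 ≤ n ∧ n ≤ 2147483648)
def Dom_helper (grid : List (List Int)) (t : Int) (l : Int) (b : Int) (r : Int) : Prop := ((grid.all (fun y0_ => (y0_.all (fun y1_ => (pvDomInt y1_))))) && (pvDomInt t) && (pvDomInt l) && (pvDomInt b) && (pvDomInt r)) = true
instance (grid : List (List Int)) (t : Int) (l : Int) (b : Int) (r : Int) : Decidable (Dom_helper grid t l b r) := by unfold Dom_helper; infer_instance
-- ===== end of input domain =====

-- B replaces A's turning state machine (per-cell corner tests, direction variable,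
-- first-visit flag) by four predetermined corner-to-corner edge walks (objective: simpler).

-- grid[i][j] with Python negative-index semantics; exact under Pre_ (both indices in range).
def cell (grid : List (List Int)) (i j : Int) : Int :=
  PySem.List.pyGetD (PySem.List.pyGetD grid i []) j 0

-- ===== PORT A =====
-- A's while-loop: state (i, j, drct, f, res); fuel only makes it total, Pre_ guarantees it
-- suffices (the loop breaks after exactly 2*((b-t)+(r-l)) appends there).
def helperLoop (grid : List (List Int)) (t l b r : Int) :
    Int → Int → Int × Int → Bool → List Int → Nat → List Int
  | _, _, _, _, res, 0 => res
  | i, j, d, f, res, Nat.succ n =>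
    if (i, j) = (t, l) ∧ f = false then res
    else
      let f' := if (i, j) = (t, l) then false else f
      let d1 := if (i, j) = (t, l) then ((0 : Int), (1 : Int)) else d
      let d2 := if (i, j) = (t, r) then ((1 : Int), (0 : Int)) else d1
      let d3 := if (i, j) = (b, r) then ((0 : Int), (-1 : Int)) else d2
      let d4 := if (i, j) = (b, l) then ((-1 : Int), (0 : Int)) else d3
      helperLoop grid t l b r (i + d4.1) (j + d4.2) d4 f' (res ++ [cell grid i j]) n

def helper (grid : List (List Int)) (t : Int) (l : Int) (b : Int) (r : Int) : List Int :=
  helperLoop grid t l b r t l (0, 1) true [] ((2 * ((b - t) + (r - l))).toNat + 1)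

-- ===== PORT B =====
-- B's inner 'while (i, j) != (ci, cj)' walk; the fuel (the signed distance to the
-- corner along the direction) only makes it total — on Pre_ it is exactly the number
-- of iterations the Python while-loop performs.
def walkSeg (grid : List (List Int)) (ci cj di dj : Int) :
    Int → Int → List Int → Nat → Int × Int × List Int
  | i, j, out, 0 => (i, j, out)
  | i, j, out, Nat.succ n =>
    if (i, j) = (ci, cj) then (i, j, out)
    else walkSeg grid ci cj di dj (i + di) (j + dj) (out ++ [cell grid i j]) n

def helper_alt (grid : List (List Int)) (t : Int) (l : Int) (b : Int) (r : Int) : List Int :=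
  let segs : List ((Int × Int) × Int × Int) :=
    [((t, r), 0, 1), ((b, r), 1, 0), ((b, l), 0, -1), ((t, l), -1, 0)]
  (segs.foldl
    (fun s seg =>
      walkSeg grid seg.1.1 seg.1.2 seg.2.1 seg.2.2 s.1 s.2.1 s.2.2
        ((seg.1.1 - s.1) * seg.2.1 + (seg.1.2 - s.2.1) * seg.2.2).toNat)
    (t, l, ([] : List Int))).2.2

-- ===== PRECONDITION & SPEC =====
-- Pre_ admits exactly the inputs on which the Python A returns: a proper ring t < b,
-- l ≤ r, with every accessed cell in (Python, possibly negative) index range.  On every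
-- input it excludes A RAISES IndexError (checked by running A: with t = b or r < l the
-- walk never re-meets a corner, an index grows or shrinks monotonically and leaves the
-- valid range; with out-of-range bounds the first bad access raises) — the t = b part
-- of this is made checkable below in Raises_helper.
def Pre_helper (grid : List (List Int)) (t : Int) (l : Int) (b : Int) (r : Int) : Prop :=
  -- (everywhere outside: A raises "list index out of range")
  t < b ∧ l ≤ r ∧
  (-(grid.length : Int) ≤ t ∧ t < grid.length) ∧
  (-(grid.length : Int) ≤ b ∧ b < grid.length) ∧
  ∀ k ∈ List.range (b - t).toNat.succ,
    (-((PySem.List.pyGetD grid (t + (k : Int)) []).length : Int) ≤ l ∧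
      l < (PySem.List.pyGetD grid (t + (k : Int)) []).length) ∧
    (-((PySem.List.pyGetD grid (t + (k : Int)) []).length : Int) ≤ r ∧
      r < (PySem.List.pyGetD grid (t + (k : Int)) []).length)

instance (grid : List (List Int)) (t : Int) (l : Int) (b : Int) (r : Int) :
    Decidable (Pre_helper grid t l b r) := by unfold Pre_helper; infer_instance

def pvWitness_helper : List (List Int) × Int × Int × Int × Int :=
  ([[1, 2], [3, 4]], 0, 0, 1, 1)

-- On every input with t = b A raises IndexError (its last-wins corner test (b,l)
-- immediately turns the walk upward, i decreases forever and grid[i] eventually runs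
-- past -len(grid)), while B returns the natural degenerate ring: the single row
-- left-to-right then back (needing row indices t, l..r in range), or [] for a single cell.
def Raises_helper (grid : List (List Int)) (t : Int) (l : Int) (b : Int) (r : Int) : Prop :=
  t = b ∧ l ≤ r ∧
  (l = r ∨
    ((-(grid.length : Int) ≤ t ∧ t < grid.length) ∧
     (-((PySem.List.pyGetD grid t []).length : Int) ≤ l ∧
       l < (PySem.List.pyGetD grid t []).length) ∧
     (-((PySem.List.pyGetD grid t []).length : Int) ≤ r ∧
       r < (PySem.List.pyGetD grid t []).length)))

instance (grid : List (List Int)) (t : Int) (l : Int) (b : Int) (r : Int) :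
    Decidable (Raises_helper grid t l b r) := by unfold Raises_helper; infer_instance

def pvRaiseWitness_helper : List (List Int) × Int × Int × Int × Int :=
  ([[1, 2]], 0, 0, 0, 1)

def pvRaiseWitnessOut_helper : List Int := [1, 2]

def Spec_helper (grid : List (List Int)) (t : Int) (l : Int) (b : Int) (r : Int) (out : List Int) : Prop :=
  out = helper_alt grid t l b r
instance (grid : List (List Int)) (t : Int) (l : Int) (b : Int) (r : Int) (out : List Int) :
    Decidable (Spec_helper grid t l b r out) := by unfold Spec_helper; infer_instance

-- ===== CLAIM (what is proved, stated in full; the proofs are below) =====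
def Claim_equal_helper : Prop := ∀ (grid : List (List Int)) (t : Int) (l : Int) (b : Int) (r : Int), Dom_helper grid t l b r → Pre_helper grid t l b r → Spec_helper grid t l b r (helper grid t l b r)

def Claim_raises_helper : Prop := (∀ (grid : List (List Int)) (t : Int) (l : Int) (b : Int) (r : Int), Dom_helper grid t l b r → Raises_helper grid t l b r → ¬ Pre_helper grid t l b r) ∧ (Dom_helper (pvRaiseWitness_helper.1) (pvRaiseWitness_helper.2.1) (pvRaiseWitness_helper.2.2.1) (pvRaiseWitness_helper.2.2.2.1) (pvRaiseWitness_helper.2.2.2.2) ∧ Raises_helper (pvRaiseWitness_helper.1) (pvRaiseWitness_helper.2.1) (pvRaiseWitness_helper.2.2.1) (pvRaiseWitness_helper.2.2.2.1) (pvRaiseWitness_helper.2.2.2.2) ∧ helper_alt (pvRaiseWitness_helper.1) (pvRaiseWitness_helper.2.1) (pvRaiseWitness_helper.2.2.1) (pvRaiseWitness_helper.2.2.2.1) (pvRaiseWitness_helper.2.2.2.2) = pvRaiseWitnessOut_helper)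

-- ===== LEMMAS AND PROOFS =====

-- One-step unfoldings of A's loop at each kind of position on the ring.

-- first visit of (t,l), proper width (l < r): direction stays (0,1)
lemma stepStart_lt (grid : List (List Int)) (t l b r : Int) (res : List Int) (n : Nat)
    (htb : t ≠ b) (hlr : l ≠ r) :
    helperLoop grid t l b r t l (0, 1) true res (n + 1)
      = helperLoop grid t l b r t (l + 1) (0, 1) false (res ++ [cell grid t l]) n := by
  simp [helperLoop, Prod.ext_iff, htb, hlr]

-- first visit of (t,l) when l = r: the (t,r) corner fires immediately, direction (1,0)
lemma stepStart_eq (grid : List (List Int)) (t l b r : Int) (res : List Int) (n : Nat)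
    (htb : t ≠ b) (hlr : l = r) :
    helperLoop grid t l b r t l (0, 1) true res (n + 1)
      = helperLoop grid t l b r (t + 1) l (1, 0) false (res ++ [cell grid t l]) n := by
  subst hlr
  simp [helperLoop, Prod.ext_iff, htb]

lemma stepCornerTR (grid : List (List Int)) (t l b r : Int) (res : List Int) (n : Nat)
    (htb : t ≠ b) (hlr : l ≠ r) :
    helperLoop grid t l b r t r (0, 1) false res (n + 1)
      = helperLoop grid t l b r (t + 1) r (1, 0) false (res ++ [cell grid t r]) n := by
  simp [helperLoop, Prod.ext_iff, htb, Ne.symm hlr]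

lemma stepCornerBR_lt (grid : List (List Int)) (t l b r : Int) (res : List Int) (n : Nat)
    (htb : t ≠ b) (hlr : l ≠ r) :
    helperLoop grid t l b r b r (1, 0) false res (n + 1)
      = helperLoop grid t l b r b (r - 1) (0, -1) false (res ++ [cell grid b r]) n := by
  simp [helperLoop, Prod.ext_iff, Ne.symm htb, Ne.symm hlr]
  ring_nf

lemma stepCornerBR_eq (grid : List (List Int)) (t l b r : Int) (res : List Int) (n : Nat)
    (htb : t ≠ b) (hlr : l = r) :
    helperLoop grid t l b r b r (1, 0) false res (n + 1)
      = helperLoop grid t l b r (b - 1) r (-1, 0) false (res ++ [cell grid b r]) n := by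
  subst hlr
  simp [helperLoop, Prod.ext_iff, Ne.symm htb]
  ring_nf

lemma stepCornerBL (grid : List (List Int)) (t l b r : Int) (res : List Int) (n : Nat)
    (htb : t ≠ b) (_hlr : l ≠ r) :
    helperLoop grid t l b r b l (0, -1) false res (n + 1)
      = helperLoop grid t l b r (b - 1) l (-1, 0) false (res ++ [cell grid b l]) n := by
  simp [helperLoop, Prod.ext_iff, Ne.symm htb]
  ring_nf

-- walking right along the top row up to (t,r)
lemma phaseTop (grid : List (List Int)) (t l b r : Int) (_htb : t ≠ b) :
    ∀ (k : Nat) (n : Nat) (res : List Int) (j : Int), l < j → j + k = r →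
    helperLoop grid t l b r t j (0, 1) false res (k + n)
      = helperLoop grid t l b r t r (0, 1) false
          (res ++ (PySem.List.pyRange j r 1).map (fun x => cell grid t x)) n := by
  intro k
  induction k with
  | zero =>
    intro n res j hlj hjk
    have : j = r := by omega
    subst this
    simp [PySem.List.pyRange_one_eq_nil le_rfl]
  | succ k ih =>
    intro n res j hlj hjk
    have hjr : j ≠ r := by omega
    have hjl : j ≠ l := by omega
    have hstep : helperLoop grid t l b r t j (0, 1) false res (k + 1 + n)
        = helperLoop grid t l b r t (j + 1) (0, 1) false (res ++ [cell grid t j]) (k + n) := by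
      have : k + 1 + n = (k + n) + 1 := by omega
      rw [this]
      simp [helperLoop, Prod.ext_iff, hjl, hjr]
    rw [hstep, ih n (res ++ [cell grid t j]) (j + 1) (by omega) (by omega),
        PySem.List.pyRange_one_cons (by omega : j < r)]
    simp

-- walking down the right column up to (b,r)
lemma phaseRight (grid : List (List Int)) (t l b r : Int) :
    ∀ (k : Nat) (n : Nat) (res : List Int) (i : Int), t < i → i + k = b →
    helperLoop grid t l b r i r (1, 0) false res (k + n)
      = helperLoop grid t l b r b r (1, 0) false
          (res ++ (PySem.List.pyRange i b 1).map (fun x => cell grid x r)) n := by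
  intro k
  induction k with
  | zero =>
    intro n res i hti hik
    have : i = b := by omega
    subst this
    simp [PySem.List.pyRange_one_eq_nil le_rfl]
  | succ k ih =>
    intro n res i hti hik
    have hib : i ≠ b := by omega
    have hit : i ≠ t := by omega
    have hstep : helperLoop grid t l b r i r (1, 0) false res (k + 1 + n)
        = helperLoop grid t l b r (i + 1) r (1, 0) false (res ++ [cell grid i r]) (k + n) := by
      have : k + 1 + n = (k + n) + 1 := by omega
      rw [this]
      simp [helperLoop, Prod.ext_iff, hit, hib]
    rw [hstep, ih n (res ++ [cell grid i r]) (i + 1) (by omega) (by omega),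
        PySem.List.pyRange_one_cons (by omega : i < b)]
    simp

-- walking left along the bottom row up to (b,l)
lemma phaseBottom (grid : List (List Int)) (t l b r : Int) (htb : t ≠ b) :
    ∀ (k : Nat) (n : Nat) (res : List Int) (j : Int), j < r → j - k = l →
    helperLoop grid t l b r b j (0, -1) false res (k + n)
      = helperLoop grid t l b r b l (0, -1) false
          (res ++ (PySem.List.pyRange j l (-1)).map (fun x => cell grid b x)) n := by
  intro k
  induction k with
  | zero =>
    intro n res j hjr hjk
    have : j = l := by omega
    subst this
    simp [PySem.List.pyRange_neg_one_eq_nil le_rfl]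
  | succ k ih =>
    intro n res j hjr hjk
    have hjl : j ≠ l := by omega
    have hjr' : j ≠ r := by omega
    have hstep : helperLoop grid t l b r b j (0, -1) false res (k + 1 + n)
        = helperLoop grid t l b r b (j - 1) (0, -1) false (res ++ [cell grid b j]) (k + n) := by
      have : k + 1 + n = (k + n) + 1 := by omega
      rw [this]
      simp [helperLoop, Prod.ext_iff, hjl, hjr', Ne.symm htb]
      ring_nf
    rw [hstep, ih n (res ++ [cell grid b j]) (j - 1) (by omega) (by omega),
        PySem.List.pyRange_neg_one_cons (by omega : l < j)]
    simp

-- walking up the left column; reaching (t,l) again breaks the loop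
lemma phaseLeft (grid : List (List Int)) (t l b r : Int) :
    ∀ (k : Nat) (n : Nat) (res : List Int) (i : Int), i < b → i - k = t →
    helperLoop grid t l b r i l (-1, 0) false res (k + (n + 1))
      = res ++ (PySem.List.pyRange i t (-1)).map (fun x => cell grid x l) := by
  intro k
  induction k with
  | zero =>
    intro n res i hib hik
    have : i = t := by omega
    subst this
    simp [helperLoop, PySem.List.pyRange_neg_one_eq_nil le_rfl]
  | succ k ih =>
    intro n res i hib hik
    have hit : i ≠ t := by omega
    have hib' : i ≠ b := by omega
    have hstep : helperLoop grid t l b r i l (-1, 0) false res (k + 1 + (n + 1))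
        = helperLoop grid t l b r (i - 1) l (-1, 0) false (res ++ [cell grid i l]) (k + (n + 1)) := by
      have : k + 1 + (n + 1) = (k + (n + 1)) + 1 := by omega
      rw [this]
      simp [helperLoop, Prod.ext_iff, hit, hib']
      ring_nf
    rw [hstep, ih n (res ++ [cell grid i l]) (i - 1) (by omega) (by omega),
        PySem.List.pyRange_neg_one_cons (by omega : t < i)]
    simp

-- Evaluations of B's four corner-to-corner walks (induction on the distance k).
lemma walkRight (grid : List (List Int)) (ci : Int) :
    ∀ (k : Nat) (j cj : Int) (out : List Int), cj = j + k →
    walkSeg grid ci cj 0 1 ci j out k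
      = (ci, cj, out ++ (PySem.List.pyRange j cj 1).map (fun x => cell grid ci x)) := by
  intro k
  induction k with
  | zero =>
    intro j cj out h
    have : cj = j := by omega
    subst this
    simp [walkSeg, PySem.List.pyRange_one_eq_nil le_rfl]
  | succ k ih =>
    intro j cj out h
    have hne : j ≠ cj := by omega
    simp only [walkSeg]
    rw [if_neg (by simp [Prod.ext_iff, hne])]
    rw [show walkSeg grid ci cj 0 1 (ci + 0) (j + 1) (out ++ [cell grid ci j]) k
          = walkSeg grid ci cj 0 1 ci (j + 1) (out ++ [cell grid ci j]) k by norm_num,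
        ih (j + 1) cj _ (by omega), PySem.List.pyRange_one_cons (by omega : j < cj)]
    simp

lemma walkDown (grid : List (List Int)) (cj : Int) :
    ∀ (k : Nat) (i ci : Int) (out : List Int), ci = i + k →
    walkSeg grid ci cj 1 0 i cj out k
      = (ci, cj, out ++ (PySem.List.pyRange i ci 1).map (fun x => cell grid x cj)) := by
  intro k
  induction k with
  | zero =>
    intro i ci out h
    have : ci = i := by omega
    subst this
    simp [walkSeg, PySem.List.pyRange_one_eq_nil le_rfl]
  | succ k ih =>
    intro i ci out h
    have hne : i ≠ ci := by omega
    simp only [walkSeg]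
    rw [if_neg (by simp [Prod.ext_iff, hne])]
    rw [show walkSeg grid ci cj 1 0 (i + 1) (cj + 0) (out ++ [cell grid i cj]) k
          = walkSeg grid ci cj 1 0 (i + 1) cj (out ++ [cell grid i cj]) k by norm_num,
        ih (i + 1) ci _ (by omega), PySem.List.pyRange_one_cons (by omega : i < ci)]
    simp

lemma walkLeft (grid : List (List Int)) (ci : Int) :
    ∀ (k : Nat) (j cj : Int) (out : List Int), cj = j - k →
    walkSeg grid ci cj 0 (-1) ci j out k
      = (ci, cj, out ++ (PySem.List.pyRange j cj (-1)).map (fun x => cell grid ci x)) := by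
  intro k
  induction k with
  | zero =>
    intro j cj out h
    have : cj = j := by omega
    subst this
    simp [walkSeg, PySem.List.pyRange_neg_one_eq_nil le_rfl]
  | succ k ih =>
    intro j cj out h
    have hne : j ≠ cj := by omega
    simp only [walkSeg]
    rw [if_neg (by simp [Prod.ext_iff, hne])]
    rw [show walkSeg grid ci cj 0 (-1) (ci + 0) (j + -1) (out ++ [cell grid ci j]) k
          = walkSeg grid ci cj 0 (-1) ci (j - 1) (out ++ [cell grid ci j]) k by
            rw [show j + (-1 : Int) = j - 1 by ring, show ci + (0 : Int) = ci by ring],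
        ih (j - 1) cj _ (by omega), PySem.List.pyRange_neg_one_cons (by omega : cj < j)]
    simp

lemma walkUp (grid : List (List Int)) (cj : Int) :
    ∀ (k : Nat) (i ci : Int) (out : List Int), ci = i - k →
    walkSeg grid ci cj (-1) 0 i cj out k
      = (ci, cj, out ++ (PySem.List.pyRange i ci (-1)).map (fun x => cell grid x cj)) := by
  intro k
  induction k with
  | zero =>
    intro i ci out h
    have : ci = i := by omega
    subst this
    simp [walkSeg, PySem.List.pyRange_neg_one_eq_nil le_rfl]
  | succ k ih =>
    intro i ci out h
    have hne : i ≠ ci := by omega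
    simp only [walkSeg]
    rw [if_neg (by simp [Prod.ext_iff, hne])]
    rw [show walkSeg grid ci cj (-1) 0 (i + -1) (cj + 0) (out ++ [cell grid i cj]) k
          = walkSeg grid ci cj (-1) 0 (i - 1) cj (out ++ [cell grid i cj]) k by
            rw [show i + (-1 : Int) = i - 1 by ring, show cj + (0 : Int) = cj by ring],
        ih (i - 1) ci _ (by omega), PySem.List.pyRange_neg_one_cons (by omega : ci < i)]
    simp

-- ===== VERDICT (by name: the statement is the Claim_ definition above) =====
theorem helper_spec : Claim_equal_helper := by
  intro grid t l b r _ hpre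
  obtain ⟨htb, hlr, -, -, -⟩ := hpre
  have htb' : t ≠ b := by omega
  unfold Spec_helper helper helper_alt
  simp only [List.foldl]
  rw [walkRight grid t _ l r [] (by omega)]
  simp only []
  rw [walkDown grid r _ t b _ (by omega)]
  simp only []
  rw [walkLeft grid b _ r l _ (by omega)]
  simp only []
  rw [walkUp grid l _ b t _ (by omega)]
  simp only []
  rcases lt_or_eq_of_le hlr with hlt | heq
  · -- proper ring, l < r
    have hlr' : l ≠ r := by omega
    have hF : (2 * ((b - t) + (r - l))).toNat + 1
        = ((r - l - 1).toNat + (((b - t - 1).toNat + (((r - l - 1).toNat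
            + (((b - t - 1).toNat + (0 + 1)) + 1)) + 1)) + 1)) + 1 := by omega
    rw [hF, stepStart_lt grid t l b r _ _ htb' hlr',
        phaseTop grid t l b r htb' _ _ _ (l + 1) (by omega) (by omega),
        stepCornerTR grid t l b r _ _ htb' hlr',
        phaseRight grid t l b r _ _ _ (t + 1) (by omega) (by omega),
        stepCornerBR_lt grid t l b r _ _ htb' hlr',
        phaseBottom grid t l b r htb' _ _ _ (r - 1) (by omega) (by omega),
        stepCornerBL grid t l b r _ _ htb' hlr',
        phaseLeft grid t l b r _ _ _ (b - 1) (by omega) (by omega)]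
    rw [PySem.List.pyRange_one_cons (by omega : l < r),
        PySem.List.pyRange_one_cons (by omega : t < b),
        PySem.List.pyRange_neg_one_cons (by omega : l < r),
        PySem.List.pyRange_neg_one_cons (by omega : t < b)]
    simp
  · -- degenerate width l = r: down the column and back up
    subst heq
    have hF : (2 * ((b - t) + (l - l))).toNat + 1
        = ((b - t - 1).toNat + (((b - t - 1).toNat + (0 + 1)) + 1)) + 1 := by omega
    rw [hF, stepStart_eq grid t l b l _ _ htb' rfl,
        phaseRight grid t l b l _ _ _ (t + 1) (by omega) (by omega),
        stepCornerBR_eq grid t l b l _ _ htb' rfl,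
        phaseLeft grid t l b l _ _ _ (b - 1) (by omega) (by omega)]
    rw [PySem.List.pyRange_one_cons (by omega : t < b),
        PySem.List.pyRange_neg_one_cons (by omega : t < b)]
    simp [PySem.List.pyRange_one_eq_nil (le_refl l),
          PySem.List.pyRange_neg_one_eq_nil (le_refl l)]

@[simp] theorem helper_raises : Claim_raises_helper := by
  unfold Claim_raises_helper
  refine ⟨?_, by decide⟩
  intro grid t l b r _ hrs hpre
  have h1 := hrs.1
  have h2 := hpre.1
  omega
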